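-- pv_equiv track=rewrite | github.com/KibyPoyo/AdventOfCode2024 | jour19/jour19.py | find_all_combinaisons
-- ===== SOURCE A (Python) =====
-- def find_all_combinaisons(towels, combinaison, seen):
--     if combinaison in seen:
--         return seen[combinaison]
--
--     if combinaison == '':
--         return 1
--
--     possibilities = 0
--     for towel in towels:
--         if combinaison.startswith(towel):
--             cut = combinaison[len(towel):]
--             possibilities += find_all_combinaisons(towels, cut, seen)
--     seen[combinaison] = possibilities
--     return seen[combinaison]
-- ===== SOURCE B (Python) =====
-- def find_all_combinaisons(towels, combinaison, seen):
--     # Bottom-up DP over suffixes (return-value equivalent; does not write into `seen`).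
--     n = len(combinaison)
--     ways = []  # after handling start index i, ways[j] holds the count for combinaison[i+j:]
--     for i in range(n, -1, -1):
--         s = combinaison[i:]
--         if s in seen:
--             w = seen[s]
--         elif s == '':
--             w = 1
--         else:
--             w = sum(ways[len(t) - 1] for t in towels if t and s.startswith(t))
--         ways.insert(0, w)
--     return ways[0]
-- ===== Notes on version B (the rewrite author's own statement) =====
-- stated objective: alternative
-- what changed: Replaces A's top-down memoized recursion (which mutates the seen dict) by an iterative bottom-up dynamic-programming pass that builds a table of counts for every suffix, from the shortest suffix to the whole string; the return value is identical, but B performs no recursion and never writes into seen.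
import Mathlib
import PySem

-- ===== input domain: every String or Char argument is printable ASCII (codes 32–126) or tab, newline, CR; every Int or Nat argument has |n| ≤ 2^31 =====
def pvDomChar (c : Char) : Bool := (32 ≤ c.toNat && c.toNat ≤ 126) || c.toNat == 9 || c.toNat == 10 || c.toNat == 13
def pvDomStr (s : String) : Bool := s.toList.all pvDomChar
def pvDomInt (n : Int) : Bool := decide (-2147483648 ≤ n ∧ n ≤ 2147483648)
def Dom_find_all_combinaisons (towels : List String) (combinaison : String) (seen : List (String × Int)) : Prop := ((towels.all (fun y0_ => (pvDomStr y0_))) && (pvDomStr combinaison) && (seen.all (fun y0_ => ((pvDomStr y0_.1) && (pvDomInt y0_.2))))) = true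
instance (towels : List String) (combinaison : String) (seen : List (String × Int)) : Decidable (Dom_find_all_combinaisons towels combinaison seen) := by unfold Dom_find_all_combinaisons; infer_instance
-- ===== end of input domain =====

-- B replaces A's memoized recursion (which also mutates `seen`) by an iterative bottom-up
-- DP table over suffixes; equivalence is about the RETURN value only (B does not write into `seen`).

-- ===== PORT A =====
-- state-threading port of A's recursion: the memo dict is passed along and returned.
-- `fuel` only makes the recursion total; on every input admitted by Pre_ it never runs out.
def faGo (towels : List String) : Nat → String → PySem.Dict String Int → Int × PySem.Dict String Int
  | fuel, combinaison, seen =>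
    match seen.get? combinaison with
    | some v => (v, seen)
    | none =>
      if combinaison = "" then (1, seen)
      else
        match fuel with
        | 0 => (0, seen)
        | Nat.succ fuel' =>
          let st := towels.foldl (fun (st : Int × PySem.Dict String Int) towel =>
            if PySem.Str.startswith combinaison towel then
              (st.1 + (faGo towels fuel' (PySem.Str.slice combinaison (some (PySem.Str.len towel)) none) st.2).1,
               (faGo towels fuel' (PySem.Str.slice combinaison (some (PySem.Str.len towel)) none) st.2).2)
            else st) ((0 : Int), seen)
          let seen2 := st.2.insert combinaison st.1
          (((seen2.get? combinaison).getD 0), seen2)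

def find_all_combinaisons (towels : List String) (combinaison : String) (seen : List (String × Int)) : Int :=
  (faGo towels (combinaison.toList.length + 1) combinaison (PySem.Dict.ofList seen)).1

-- ===== PORT B =====
def find_all_combinaisons_alt (towels : List String) (combinaison : String) (seen : List (String × Int)) : Int :=
  let d := PySem.Dict.ofList seen
  let n : Int := PySem.Str.len combinaison
  let ways := (PySem.List.pyRange n (-1) (-1)).foldl (fun ways i =>
    let s := PySem.Str.slice combinaison (some i) none
    let w : Int :=
      match d.get? s with
      | some v => v
      | none =>
        if s = "" then 1
        else towels.foldl (fun tot t =>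
          if (t != "" && PySem.Str.startswith s t) then
            tot + PySem.List.pyGetD ways (PySem.Str.len t - 1) 0
          else tot) 0
    PySem.List.insert ways 0 w) []
  PySem.List.pyGetD ways 0 0

-- ===== PRECONDITION & SPEC =====
-- Pre_ excludes exactly the inputs on which A raises RecursionError: when '' is among the
-- towels and the target string is non-empty and not already memoized, A recurses on itself forever.
def Pre_find_all_combinaisons (towels : List String) (combinaison : String) (seen : List (String × Int)) : Prop :=
  ¬ ("" ∈ towels) ∨ combinaison = "" ∨ (PySem.Dict.ofList seen).contains combinaison = true
instance (towels : List String) (combinaison : String) (seen : List (String × Int)) : Decidable (Pre_find_all_combinaisons towels combinaison seen) := by unfold Pre_find_all_combinaisons; infer_instance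

def pvWitness_find_all_combinaisons : List String × String × (List (String × Int)) :=
  (["a", "b", "ab"], "aab", [("x", 3)])

def Spec_find_all_combinaisons (towels : List String) (combinaison : String) (seen : List (String × Int)) (out : Int) : Prop := out = find_all_combinaisons_alt towels combinaison seen
instance (towels : List String) (combinaison : String) (seen : List (String × Int)) (out : Int) : Decidable (Spec_find_all_combinaisons towels combinaison seen out) := by unfold Spec_find_all_combinaisons; infer_instance

-- ===== CLAIM (what is proved, stated in full; the proofs are below) =====
def Claim_equal_find_all_combinaisons : Prop := ∀ (towels : List String) (combinaison : String) (seen : List (String × Int)), Dom_find_all_combinaisons towels combinaison seen → Pre_find_all_combinaisons towels combinaison seen → Spec_find_all_combinaisons towels combinaison seen (find_all_combinaisons towels combinaison seen)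

-- ===== LEMMAS AND PROOFS =====

-- The common mathematical value: number of decompositions of s, where pre-seeded entries of
-- the ORIGINAL dict d override the count of their suffix.  Fuelled so that it is structural.
def pvW (towels : List String) (d : PySem.Dict String Int) : Nat → String → Int
  | 0, _ => 0
  | Nat.succ fuel, s =>
    match d.get? s with
    | some v => v
    | none =>
      if s = "" then 1
      else towels.foldl (fun acc t =>
        if (t != "" && PySem.Str.startswith s t) then
          acc + pvW towels d fuel (PySem.Str.slice s (some (PySem.Str.len t)) none)
        else acc) 0

lemma guard_iff (s t : String) :
    (t != "" && PySem.Str.startswith s t) = true ↔ t ≠ "" ∧ PySem.Str.startswith s t = true := by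
  cases hb : (t != "") <;> cases hw : PySem.Str.startswith s t <;>
    simp_all [bne_iff_ne]

lemma pvW_succ (towels : List String) (d : PySem.Dict String Int) (fuel : Nat) (s : String) :
    pvW towels d (Nat.succ fuel) s =
      match d.get? s with
      | some v => v
      | none =>
        if s = "" then 1
        else towels.foldl (fun acc t =>
          if (t != "" && PySem.Str.startswith s t) then
            acc + pvW towels d fuel (PySem.Str.slice s (some (PySem.Str.len t)) none)
          else acc) 0 := by
  simp only [pvW]

lemma slice_from_toList (c : String) (j : Nat) :
    (PySem.Str.slice c (some (j : Int)) none).toList = c.toList.drop j := by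
  simp [PySem.Str.toList_slice, PySem.Chars.slice_eq_listSlice, PySem.List.slice_from_natCast]

lemma pvCut_toList (s t : String) :
    (PySem.Str.slice s (some (PySem.Str.len t)) none).toList = s.toList.drop t.toList.length := by
  rw [PySem.Str.len_eq]
  exact slice_from_toList s t.toList.length

lemma toList_ne_nil_of_ne_empty (t : String) (ht : t ≠ "") : t.toList ≠ [] := by
  intro hl
  exact ht (String.toList_inj.mp (by rw [hl]; rfl))

lemma toList_length_pos_of_ne_empty (t : String) (ht : t ≠ "") : 0 < t.toList.length := by
  cases h : t.toList with
  | nil => exact absurd h (toList_ne_nil_of_ne_empty t ht)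
  | cons a l => simp

lemma startswith_prefix (s t : String) (hp : PySem.Str.startswith s t = true) :
    t.toList <+: s.toList := by
  rw [PySem.Str.startswith_eq] at hp
  exact (PySem.Chars.startswith_iff _ _).mp hp

lemma pvCut_length_lt (s t : String) (ht : t ≠ "") (hp : PySem.Str.startswith s t = true) :
    (PySem.Str.slice s (some (PySem.Str.len t)) none).toList.length < s.toList.length := by
  have hle := (startswith_prefix s t hp).length_le
  have hpos := toList_length_pos_of_ne_empty t ht
  rw [pvCut_toList, List.length_drop]
  omega

lemma pvW_congr (towels : List String) (d : PySem.Dict String Int) :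
    ∀ (f1 : Nat) (f2 : Nat) (s : String), s.toList.length < f1 → s.toList.length < f2 →
      pvW towels d f1 s = pvW towels d f2 s := by
  intro f1
  induction f1 with
  | zero => intro f2 s h1 h2; omega
  | succ f1 ih =>
    intro f2 s h1 h2
    cases f2 with
    | zero => omega
    | succ f2 =>
      simp only [pvW]
      cases hd : d.get? s with
      | some v => rfl
      | none =>
        by_cases hs : s = ""
        · simp [hs]
        · simp only [if_neg hs]
          apply PySem.List.foldl_congr_mem
          intro acc t htl
          by_cases hg : (t != "" && PySem.Str.startswith s t) = true
          · rw [if_pos hg, if_pos hg]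
            congr 1
            rcases (guard_iff s t).mp hg with ⟨ht, hsw⟩
            have hlt := pvCut_length_lt s t ht hsw
            exact ih f2 _ (by omega) (by omega)
          · rw [if_neg hg, if_neg hg]

-- invariant for A's threaded memo dict, relative to the original dict d
def pvInv (towels : List String) (d : PySem.Dict String Int) (m : PySem.Dict String Int) : Prop :=
  (∀ s v, m.get? s = some v → v = pvW towels d (s.toList.length + 1) s) ∧
  (∀ s, (d.get? s).isSome → m.get? s = d.get? s)

lemma get?_none_of_inv (towels : List String) (d m : PySem.Dict String Int)
    (hInv : pvInv towels d m) (c : String) (hd : m.get? c = none) : d.get? c = none := by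
  by_cases h : (d.get? c).isSome
  · have h2 := hInv.2 c h
    rw [hd] at h2
    rw [← h2] at h
    simp at h
  · exact Option.not_isSome_iff_eq_none.mp h

lemma faGo_correct (towels : List String) (d : PySem.Dict String Int)
    (hne : "" ∉ towels) :
    ∀ (fuel : Nat) (c : String) (m : PySem.Dict String Int), pvInv towels d m →
      c.toList.length < fuel →
      (faGo towels fuel c m).1 = pvW towels d (c.toList.length + 1) c ∧
      pvInv towels d (faGo towels fuel c m).2 := by
  intro fuel
  induction fuel with
  | zero => intro c m _ hlen; omega
  | succ fuel ih =>
    intro c m hInv hlen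
    simp only [faGo]
    cases hd : m.get? c with
    | some v =>
      exact ⟨hInv.1 c v hd, hInv⟩
    | none =>
      have hdc : d.get? c = none := get?_none_of_inv towels d m hInv c hd
      by_cases hc : c = ""
      · subst hc
        rw [if_pos rfl]
        constructor
        · simp only [pvW, hdc]
          rfl
        · exact hInv
      · rw [if_neg hc]
        -- the towel loop: threaded state (possibilities, memo dict)
        have hfold : ∀ (ts : List String), (∀ t ∈ ts, t ∈ towels) →
            ∀ (poss : Int) (m' : PySem.Dict String Int), pvInv towels d m' →
            (ts.foldl (fun (st : Int × PySem.Dict String Int) towel =>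
              if PySem.Str.startswith c towel then
                (st.1 + (faGo towels fuel (PySem.Str.slice c (some (PySem.Str.len towel)) none) st.2).1,
                 (faGo towels fuel (PySem.Str.slice c (some (PySem.Str.len towel)) none) st.2).2)
              else st) (poss, m')).1
            = ts.foldl (fun acc t =>
                if (t != "" && PySem.Str.startswith c t) then
                  acc + pvW towels d fuel (PySem.Str.slice c (some (PySem.Str.len t)) none)
                else acc) poss
            ∧ pvInv towels d
              (ts.foldl (fun (st : Int × PySem.Dict String Int) towel =>
                if PySem.Str.startswith c towel then
                  (st.1 + (faGo towels fuel (PySem.Str.slice c (some (PySem.Str.len towel)) none) st.2).1,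
                   (faGo towels fuel (PySem.Str.slice c (some (PySem.Str.len towel)) none) st.2).2)
                else st) (poss, m')).2 := by
          intro ts
          induction ts with
          | nil => intro _ poss m' hInv'; exact ⟨rfl, hInv'⟩
          | cons t ts ihts =>
            intro hts poss m' hInv'
            have htmem : t ∈ towels := hts t (by simp)
            have ht : t ≠ "" := by
              intro h
              exact hne (h ▸ htmem)
            have hts' : ∀ u ∈ ts, u ∈ towels := fun u hu => hts u (by simp [hu])
            simp only [List.foldl_cons]
            by_cases hsw : PySem.Str.startswith c t = true
            · have hcut := pvCut_length_lt c t ht hsw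
              have hrec := ih (PySem.Str.slice c (some (PySem.Str.len t)) none) m' hInv' (by omega)
              have hW : (faGo towels fuel (PySem.Str.slice c (some (PySem.Str.len t)) none) m').1
                  = pvW towels d fuel (PySem.Str.slice c (some (PySem.Str.len t)) none) := by
                rw [hrec.1]
                exact pvW_congr towels d _ fuel _ (by omega) (by omega)
              have hguard : (t != "" && PySem.Str.startswith c t) = true :=
                (guard_iff c t).mpr ⟨ht, hsw⟩
              rw [if_pos hsw, if_pos hguard, hW]
              exact ihts hts' _ _ hrec.2
            · have hgneg : ¬ ((t != "" && PySem.Str.startswith c t) = true) := fun h =>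
                hsw ((guard_iff c t).mp h).2
              rw [if_neg hsw, if_neg hgneg]
              exact ihts hts' poss m' hInv'
        have hmain := hfold towels (fun _ h => h) 0 m hInv
        have hWb : pvW towels d (c.toList.length + 1) c
            = towels.foldl (fun acc t =>
                if (t != "" && PySem.Str.startswith c t) then
                  acc + pvW towels d fuel (PySem.Str.slice c (some (PySem.Str.len t)) none)
                else acc) 0 := by
          simp only [pvW, hdc]
          rw [if_neg hc]
          apply PySem.List.foldl_congr_mem
          intro acc t htl
          by_cases hg : (t != "" && PySem.Str.startswith c t) = true
          · rw [if_pos hg, if_pos hg]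
            congr 1
            rcases (guard_iff c t).mp hg with ⟨ht, hsw⟩
            have hlt := pvCut_length_lt c t ht hsw
            exact pvW_congr towels d _ _ _ (by omega) (by omega)
          · rw [if_neg hg, if_neg hg]
        have hP : (towels.foldl (fun (st : Int × PySem.Dict String Int) towel =>
              if PySem.Str.startswith c towel then
                (st.1 + (faGo towels fuel (PySem.Str.slice c (some (PySem.Str.len towel)) none) st.2).1,
                 (faGo towels fuel (PySem.Str.slice c (some (PySem.Str.len towel)) none) st.2).2)
              else st) ((0 : Int), m)).1 = pvW towels d (c.toList.length + 1) c := by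
          rw [hmain.1, ← hWb]
        constructor
        · simp only [PySem.Dict.get?_insert_self, Option.getD_some]
          exact hP
        · constructor
          · intro s v hv
            rw [PySem.Dict.get?_insert] at hv
            by_cases hsc : s = c
            · rw [if_pos hsc] at hv
              cases hv
              rw [hsc]
              exact hP
            · rw [if_neg hsc] at hv
              exact hmain.2.1 s v hv
          · intro s hs
            by_cases hsc : s = c
            · subst hsc
              rw [hdc] at hs
              simp at hs
            · rw [PySem.Dict.get?_insert, if_neg hsc]
              exact hmain.2.2 s hs

-- B's accumulated table after processing suffix lengths 0..m-1
lemma fb_fold_correct (towels : List String) (c : String) (seen : List (String × Int)) :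
    ∀ m, m ≤ c.toList.length + 1 →
      List.foldl (fun ways i =>
        PySem.List.insert ways 0
          (match (PySem.Dict.ofList seen).get? (PySem.Str.slice c (some i) none) with
           | some v => v
           | none =>
             if PySem.Str.slice c (some i) none = "" then 1
             else towels.foldl (fun tot t =>
               if (t != "" && PySem.Str.startswith (PySem.Str.slice c (some i) none) t) then
                 tot + PySem.List.pyGetD ways (PySem.Str.len t - 1) 0
               else tot) 0)) []
        ((List.range m).map (fun (k : Nat) => (c.toList.length : Int) - (k : Int)))
      = (List.range m).reverse.map (fun k =>
          pvW towels (PySem.Dict.ofList seen) (k + 1)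
            (PySem.Str.slice c (some ((c.toList.length - k : Nat) : Int)) none)) := by
  intro m
  induction m with
  | zero => intro _; simp
  | succ m ihm =>
    intro hm
    have hm' : m ≤ c.toList.length := by omega
    rw [List.range_succ, List.map_append, List.foldl_append, ihm (by omega)]
    rw [List.reverse_append, List.reverse_singleton]
    simp only [List.map_cons, List.map_nil, List.foldl_cons, List.foldl_nil,
      List.singleton_append]
    rw [PySem.List.insert_zero]
    congr 1
    -- the freshly computed value equals pvW (m+1) (suffix of length m)
    have hcast : (c.toList.length : Int) - (m : Int) = ((c.toList.length - m : Nat) : Int) := by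
      omega
    rw [hcast]
    set s := PySem.Str.slice c (some ((c.toList.length - m : Nat) : Int)) none with hs
    have hslen : s.toList.length = m := by
      rw [hs, slice_from_toList, List.length_drop]
      omega
    conv_rhs => rw [show m + 1 = Nat.succ m from rfl, pvW_succ]
    cases hd : (PySem.Dict.ofList seen).get? s with
    | some v => rfl
    | none =>
      by_cases hse : s = ""
      · simp [hse]
      · rw [if_neg hse, if_neg hse]
        apply PySem.List.foldl_congr_mem
        intro acc t htl
        by_cases hg : (t != "" && PySem.Str.startswith s t) = true
        · rw [if_pos hg, if_pos hg]
          congr 1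
          rcases (guard_iff s t).mp hg with ⟨ht, hsw⟩
          have hL1 := toList_length_pos_of_ne_empty t ht
          have hLm : t.toList.length ≤ m := by
            have := (startswith_prefix s t hsw).length_le
            omega
          -- LHS: index into the accumulated table
          have hidx : (PySem.Str.len t - 1 : Int) = ((t.toList.length - 1 : Nat) : Int) := by
            rw [PySem.Str.len_eq, Nat.cast_sub hL1]
            simp
          rw [hidx, PySem.List.pyGetD_natCast]
          have hltlen : t.toList.length - 1 < ((List.range m).reverse.map (fun k =>
              pvW towels (PySem.Dict.ofList seen) (k + 1)
                (PySem.Str.slice c (some ((c.toList.length - k : Nat) : Int)) none))).length := by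
            rw [List.length_map, List.length_reverse, List.length_range]
            omega
          rw [List.getD_eq_getElem _ _ hltlen]
          simp only [List.getElem_map, List.getElem_reverse, List.length_range,
            List.getElem_range]
          -- the two suffix strings coincide
          have hstr : PySem.Str.slice c
              (some ((c.toList.length - (m - 1 - (t.toList.length - 1)) : Nat) : Int)) none
              = PySem.Str.slice s (some (PySem.Str.len t)) none := by
            apply String.toList_inj.mp
            rw [slice_from_toList, pvCut_toList, hs, slice_from_toList, List.drop_drop]
            congr 1
            omega
          rw [hstr]
          apply pvW_congr
          · rw [pvCut_toList, List.length_drop, hslen]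
            omega
          · rw [pvCut_toList, List.length_drop, hslen]
            omega
        · rw [if_neg hg, if_neg hg]

lemma alt_eq_pvW (towels : List String) (c : String) (seen : List (String × Int)) :
    find_all_combinaisons_alt towels c seen
      = pvW towels (PySem.Dict.ofList seen) (c.toList.length + 1) c := by
  have hrange : PySem.List.pyRange (PySem.Str.len c) (-1) (-1)
      = (List.range (c.toList.length + 1)).map (fun (k : Nat) => (c.toList.length : Int) - (k : Int)) := by
    rw [PySem.Str.len_eq, PySem.List.pyRange_neg_one]
    have h1 : ((c.toList.length : Int) - (-1)).toNat = c.toList.length + 1 := by omega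
    rw [h1]
  simp only [find_all_combinaisons_alt]
  rw [hrange, fb_fold_correct towels c seen (c.toList.length + 1) (le_refl _)]
  rw [List.range_succ, List.reverse_append, List.reverse_singleton]
  simp only [List.singleton_append, List.map_cons]
  rw [PySem.List.pyGetD_zero_cons]
  have h0 : ((c.toList.length - c.toList.length : Nat) : Int) = ((0 : Nat) : Int) := by omega
  rw [h0]
  congr 1
  apply String.toList_inj.mp
  rw [slice_from_toList]
  simp

-- ===== VERDICT (by name: the statement is the Claim_ definition above) =====
theorem find_all_combinaisons_spec : Claim_equal_find_all_combinaisons := by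
  intro towels c seen _ hpre
  unfold Spec_find_all_combinaisons
  rw [alt_eq_pvW]
  unfold find_all_combinaisons
  rcases hpre with hne | hc | hcon
  · have hInv : pvInv towels (PySem.Dict.ofList seen) (PySem.Dict.ofList seen) := by
      constructor
      · intro s v hv
        simp only [pvW, hv]
      · intro s _
        rfl
    exact (faGo_correct towels (PySem.Dict.ofList seen) hne (c.toList.length + 1) c
      (PySem.Dict.ofList seen) hInv (by omega)).1
  · subst hc
    simp only [faGo, pvW]
    cases hd : (PySem.Dict.ofList seen).get? "" with
    | some v => rfl
    | none => simp
  · rw [PySem.Dict.contains_eq_isSome_get?] at hcon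
    cases hd : (PySem.Dict.ofList seen).get? c with
    | some v =>
      simp only [faGo, pvW, hd]
    | none =>
      rw [hd] at hcon
      simp at hcon
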